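-- pv_equiv track=rewrite | github.com/ankurbhambri/DS-Algo | graph/problems/Graph problems/min_edges_removed_excaktly_k_components.py | max_edges_to_remove
-- ===== SOURCE A (Python) =====
-- def max_edges_to_remove(N, M, K, Edges):
--     adj = {i: [] for i in range(N + 1)}
--     for u, v in Edges:
--         adj[u].append(v)
--         adj[v].append(u)
--
--     visit = set()
--
--     def dfs(node):
--         visit.add(node)
--         for child in adj[node]:
--             if child not in visit:
--                 dfs(child)
--
--     c = 0
--     for i in range(N):
--         if i not in visit:
--             c += 1
--             dfs(i)
--
--     if c <= K:
--         return (
--             M - N + K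
--         )  # N is the number f nodes, M is the number of edges and K is the required number of connected components.
--
--     return -1
-- ===== SOURCE B (Python) =====
-- def max_edges_to_remove(N, M, K, Edges):
--     # union-find over nodes 0..N, union by smaller root index
--     parent = {i: i for i in range(N + 1)}
--
--     def find(x):
--         while parent[x] != x:
--             x = parent[x]
--         return x
--
--     for u, v in Edges:
--         ru, rv = find(u), find(v)
--         if ru < rv:
--             parent[rv] = ru
--         elif rv < ru:
--             parent[ru] = rv
--
--     c = len({find(i) for i in range(N)})
--     return M - N + K if c <= K else -1
-- ===== Notes on version B (the rewrite author's own statement) =====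
-- stated objective: alternative
-- what changed: Replaces the adjacency-list + recursive DFS component count with a union-find (union by smaller root index) that counts distinct roots over range(N); the final M - N + K / -1 logic is unchanged.
import Mathlib
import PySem

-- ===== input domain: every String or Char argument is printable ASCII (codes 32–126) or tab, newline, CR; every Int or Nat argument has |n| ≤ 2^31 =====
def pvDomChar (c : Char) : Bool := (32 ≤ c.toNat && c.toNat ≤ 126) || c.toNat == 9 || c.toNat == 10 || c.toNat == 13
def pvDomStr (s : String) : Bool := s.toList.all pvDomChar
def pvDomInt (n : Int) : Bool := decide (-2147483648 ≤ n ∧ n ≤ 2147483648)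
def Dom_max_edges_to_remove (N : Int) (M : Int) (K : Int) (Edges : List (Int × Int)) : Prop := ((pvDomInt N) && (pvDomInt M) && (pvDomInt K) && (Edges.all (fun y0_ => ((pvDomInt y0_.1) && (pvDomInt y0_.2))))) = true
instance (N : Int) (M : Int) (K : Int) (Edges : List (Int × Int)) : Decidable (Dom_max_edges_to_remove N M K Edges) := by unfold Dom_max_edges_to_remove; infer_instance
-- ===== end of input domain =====

-- B replaces A's adjacency-list + recursive DFS component count by a union-find over the nodes
-- (union by smaller root index, distinct roots counted over range(N)); objective: alternative algorithm, same cost class.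


-- ===== PORT A =====
-- adj = {i: [] for i in range(N+1)}; for u,v in Edges: adj[u].append(v); adj[v].append(u)
-- (Dict.modify's default never fires under Pre_, where u and v are keys of adj)
def pvAdjA (N : Int) (Edges : List (Int × Int)) : PySem.Dict Int (List Int) :=
  Edges.foldl
    (fun d e => (d.modify e.1 [] (· ++ [e.2])).modify e.2 [] (· ++ [e.1]))
    ((PySem.List.pyRange 0 (N + 1) 1).foldl (fun d i => d.insert i ([] : List Int)) PySem.Dict.empty)

-- def dfs(node): visit.add(node); for child in adj[node]: if child not in visit: dfs(child)
-- fuel makes the recursion structural; N.toNat + 2 exceeds the recursion depth (each call adds an unvisited node of 0..N)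
def pvDfsA (adj : PySem.Dict Int (List Int)) : Nat → Int → PySem.Set Int → PySem.Set Int
  | 0, _, vis => vis
  | fuel + 1, node, vis =>
      (adj.getD node []).foldl
        (fun v child => if child ∈ v then v else pvDfsA adj fuel child v)
        (PySem.Set.add vis node)

def max_edges_to_remove (N : Int) (M : Int) (K : Int) (Edges : List (Int × Int)) : Int :=
  let adj := pvAdjA N Edges
  let res := (PySem.List.pyRange 0 N 1).foldl
    (fun (p : Int × PySem.Set Int) i =>
      if i ∈ p.2 then p else (p.1 + 1, pvDfsA adj (N.toNat + 2) i p.2))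
    (0, PySem.Set.empty)
  if res.1 ≤ K then M - N + K else -1

-- ===== PORT B =====
-- parent = {i: i for i in range(N+1)}
def pvParent0 (N : Int) : PySem.Dict Int Int :=
  (PySem.List.pyRange 0 (N + 1) 1).foldl (fun d i => d.insert i i) PySem.Dict.empty

-- def find(x): while parent[x] != x: x = parent[x]; return x
-- fuel makes the while loop structural; N.toNat + 2 exceeds the strictly decreasing parent chain's length
def pvFindB (P : PySem.Dict Int Int) : Nat → Int → Int
  | 0, x => x
  | fuel + 1, x => let p := P.getD x x; if p = x then x else pvFindB P fuel p

-- for u,v in Edges: ru, rv = find(u), find(v); attach the larger root under the smaller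
def pvParentB (N : Int) (Edges : List (Int × Int)) : PySem.Dict Int Int :=
  Edges.foldl
    (fun P e =>
      let ru := pvFindB P (N.toNat + 2) e.1
      let rv := pvFindB P (N.toNat + 2) e.2
      if ru < rv then P.insert rv ru else if rv < ru then P.insert ru rv else P)
    (pvParent0 N)

def max_edges_to_remove_alt (N : Int) (M : Int) (K : Int) (Edges : List (Int × Int)) : Int :=
  let P := pvParentB N Edges
  let roots := (PySem.List.pyRange 0 N 1).foldl
    (fun (s : PySem.Set Int) i => PySem.Set.add s (pvFindB P (N.toNat + 2) i))
    PySem.Set.empty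
  if PySem.Set.len roots ≤ K then M - N + K else -1

-- ===== PRECONDITION & SPEC =====
-- Pre_ excludes exactly the inputs on which A raises: an edge endpoint outside 0..N is a KeyError in adj[u].append(v).
def Pre_max_edges_to_remove (N : Int) (M : Int) (K : Int) (Edges : List (Int × Int)) : Prop :=
  ∀ e ∈ Edges, 0 ≤ e.1 ∧ e.1 ≤ N ∧ 0 ≤ e.2 ∧ e.2 ≤ N
instance (N : Int) (M : Int) (K : Int) (Edges : List (Int × Int)) : Decidable (Pre_max_edges_to_remove N M K Edges) := by unfold Pre_max_edges_to_remove; infer_instance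

def pvWitness_max_edges_to_remove : Int × Int × Int × (List (Int × Int)) := (3, 2, 2, [(0, 1), (1, 2)])

def Spec_max_edges_to_remove (N : Int) (M : Int) (K : Int) (Edges : List (Int × Int)) (out : Int) : Prop := out = max_edges_to_remove_alt N M K Edges
instance (N : Int) (M : Int) (K : Int) (Edges : List (Int × Int)) (out : Int) : Decidable (Spec_max_edges_to_remove N M K Edges out) := by unfold Spec_max_edges_to_remove; infer_instance

-- ===== CLAIM (what is proved, stated in full; the proofs are below) =====
def Claim_equal_max_edges_to_remove : Prop := ∀ (N : Int) (M : Int) (K : Int) (Edges : List (Int × Int)), Dom_max_edges_to_remove N M K Edges → Pre_max_edges_to_remove N M K Edges → Spec_max_edges_to_remove N M K Edges (max_edges_to_remove N M K Edges)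

-- ===== LEMMAS AND PROOFS =====

-- the undirected edge relation of the input list, and connectivity = its equivalence closure
def pvER (Edges : List (Int × Int)) (x y : Int) : Prop := (x, y) ∈ Edges ∨ (y, x) ∈ Edges
def pvConn (Edges : List (Int × Int)) (x y : Int) : Prop := Relation.EqvGen (pvER Edges) x y
def pvClosed (Edges : List (Int × Int)) (S : List Int) : Prop := ∀ x ∈ S, ∀ y, pvER Edges x y → y ∈ S

theorem pvAdjInit_getD (l : List Int) (d : PySem.Dict Int (List Int)) (h : ∀ x, d.getD x [] = [])
    (x : Int) : (l.foldl (fun d i => d.insert i ([] : List Int)) d).getD x [] = [] := by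
  induction l generalizing d with
  | nil => exact h x
  | cons a t ih =>
      exact ih _ (fun y => by rw [PySem.Dict.getD_insert]; split <;> simp [h])
theorem pvAdj_fold_mem (l : List (Int × Int)) (d : PySem.Dict Int (List Int)) (n c : Int) :
    c ∈ ((l.foldl (fun d e => (d.modify e.1 [] (· ++ [e.2])).modify e.2 [] (· ++ [e.1])) d).getD n [])
      ↔ c ∈ d.getD n [] ∨ pvER l n c := by
  induction l generalizing d with
  | nil => simp [pvER]
  | cons e t ih =>
      obtain ⟨u, v⟩ := e
      rw [List.foldl_cons, ih]
      simp only [PySem.Dict.getD_modify]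
      simp only [pvER, List.mem_cons, List.mem_append, List.mem_singleton, Prod.mk.injEq]
      split_ifs with h1 h2 <;> subst_vars <;> simp_all <;> tauto
theorem mem_pvAdjA (N : Int) (Edges : List (Int × Int)) (n c : Int) :
    c ∈ (pvAdjA N Edges).getD n [] ↔ pvER Edges n c := by
  unfold pvAdjA
  rw [pvAdj_fold_mem]
  rw [pvAdjInit_getD _ _ (fun x => by simp [PySem.Dict.getD_empty])]
  simp
theorem pvConn_mem_iff {Edges : List (Int × Int)} {S : List Int} (hS : pvClosed Edges S)
    {x y : Int} (h : pvConn Edges x y) : x ∈ S ↔ y ∈ S := by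
  induction h with
  | rel a b hab => exact ⟨fun ha => hS a ha b hab, fun hb => hS b hb a hab.symm⟩
  | refl a => exact Iff.rfl
  | symm a b _ ih => exact ih.symm
  | trans a b c _ _ ih1 ih2 => exact ih1.trans ih2
def pvUnvis (N : Int) (vis : List Int) : Nat :=
  ((PySem.List.pyRange 0 (N + 1) 1).filter (fun k => decide (k ∉ vis))).length
theorem pvUnvis_le (N : Int) (vis : List Int) : pvUnvis N vis ≤ (N + 1).toNat := by
  unfold pvUnvis
  calc _ ≤ (PySem.List.pyRange 0 (N + 1) 1).length := List.length_filter_le _ _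
  _ = _ := by rw [PySem.List.length_pyRange_one]; omega
theorem pvUnvis_lt {N node : Int} {vis v : List Int}
    (h0 : 0 ≤ node) (h1 : node ≤ N) (hnv : node ∉ vis)
    (hsub : ∀ x ∈ vis, x ∈ v) (hmem : node ∈ v) :
    pvUnvis N v < pvUnvis N vis := by
  have hn : node ∈ PySem.List.pyRange 0 (N + 1) 1 := by
    rw [PySem.List.mem_pyRange_one]; omega
  obtain ⟨l1, l2, hsplit⟩ := List.append_of_mem hn
  unfold pvUnvis
  rw [hsplit]
  simp only [List.filter_append, List.filter_cons, List.length_append]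
  have hmono : ∀ l : List Int, (l.filter (fun k => decide (k ∉ v))).length ≤ (l.filter (fun k => decide (k ∉ vis))).length := by
    intro l
    simp only [← List.countP_eq_length_filter]
    exact List.countP_mono_left (fun x _ hx => by
      simp only [decide_eq_true_eq] at hx ⊢
      exact fun hxv => hx (hsub x hxv))
  have h2 : (decide (node ∉ v)) = false := by simp [hmem]
  have h3 : (decide (node ∉ vis)) = true := by simp [hnv]
  rw [h2, h3]
  simp only [Bool.false_eq_true, if_true, if_false, List.length_cons]
  have := hmono l1
  have := hmono l2
  omega
theorem pvER_bounds {N : Int} {Edges : List (Int × Int)}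
    (hpre : ∀ e ∈ Edges, 0 ≤ e.1 ∧ e.1 ≤ N ∧ 0 ≤ e.2 ∧ e.2 ≤ N)
    {x y : Int} (h : pvER Edges x y) : (0 ≤ x ∧ x ≤ N) ∧ (0 ≤ y ∧ y ≤ N) := by
  rcases h with h | h <;> have := hpre _ h <;> exact ⟨⟨by tauto, by tauto⟩, ⟨by tauto, by tauto⟩⟩
theorem pvDfs_main (N : Int) (Edges : List (Int × Int))
    (hpre : ∀ e ∈ Edges, 0 ≤ e.1 ∧ e.1 ≤ N ∧ 0 ≤ e.2 ∧ e.2 ≤ N) :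
    ∀ (fuel : Nat) (node : Int) (vis : PySem.Set Int),
      0 ≤ node → node ≤ N → node ∉ vis → pvUnvis N vis < fuel →
      (∀ x ∈ vis, x ∈ pvDfsA (pvAdjA N Edges) fuel node vis) ∧
      node ∈ pvDfsA (pvAdjA N Edges) fuel node vis ∧
      (∀ x ∈ pvDfsA (pvAdjA N Edges) fuel node vis, x ∈ vis ∨ (pvConn Edges node x ∧ 0 ≤ x ∧ x ≤ N)) ∧
      (∀ x ∈ pvDfsA (pvAdjA N Edges) fuel node vis, x ∉ vis → ∀ y, pvER Edges x y → y ∈ pvDfsA (pvAdjA N Edges) fuel node vis) := by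
  intro fuel
  induction fuel with
  | zero => intro node vis _ _ _ h; omega
  | succ f ih =>
      intro node vis h0 h1 h2 h3
      have aux : ∀ (cs' : List Int), (∀ c ∈ cs', pvER Edges node c) →
          ∀ v : PySem.Set Int,
          (∀ x ∈ vis, x ∈ v) → node ∈ v →
          (∀ x ∈ v, x ∈ vis ∨ (pvConn Edges node x ∧ 0 ≤ x ∧ x ≤ N)) →
          (∀ x ∈ v, x ∉ vis → x ≠ node → ∀ y, pvER Edges x y → y ∈ v) →
          (∀ x ∈ v, x ∈ cs'.foldl (fun v child => if child ∈ v then v else pvDfsA (pvAdjA N Edges) f child v) v) ∧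
          (∀ c ∈ cs', c ∈ cs'.foldl (fun v child => if child ∈ v then v else pvDfsA (pvAdjA N Edges) f child v) v) ∧
          (∀ x ∈ cs'.foldl (fun v child => if child ∈ v then v else pvDfsA (pvAdjA N Edges) f child v) v,
            x ∈ vis ∨ (pvConn Edges node x ∧ 0 ≤ x ∧ x ≤ N)) ∧
          (∀ x ∈ cs'.foldl (fun v child => if child ∈ v then v else pvDfsA (pvAdjA N Edges) f child v) v,
            x ∉ vis → x ≠ node → ∀ y, pvER Edges x y → y ∈ cs'.foldl (fun v child => if child ∈ v then v else pvDfsA (pvAdjA N Edges) f child v) v) := by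
        intro cs' hcs
        induction cs' with
        | nil => intro v hsub hnode hsound hclos
                 exact ⟨fun x hx => hx, by simp, hsound, fun x hx hx1 hx2 => hclos x hx hx1 hx2⟩
        | cons c cst ihc =>
            intro v hsub hnode hsound hclos
            simp only [List.foldl_cons]
            by_cases hc : c ∈ v
            · simp only [if_pos hc]
              obtain ⟨q1, q2, q3, q4⟩ := ihc (fun d hd => hcs d (List.mem_cons_of_mem _ hd)) v hsub hnode hsound hclos
              exact ⟨q1, fun d hd => by
                  rcases List.mem_cons.1 hd with rfl | hd
                  · exact q1 _ hc
                  · exact q2 _ hd, q3, q4⟩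
            · simp only [if_neg hc]
              have hcb := (pvER_bounds hpre (hcs c (List.mem_cons_self))).2
              have hfuel : pvUnvis N v < f := by
                have := pvUnvis_lt h0 h1 h2 hsub hnode
                omega
              obtain ⟨m1, m2, msound, mclos⟩ := ih c v hcb.1 hcb.2 hc hfuel
              set r1 := pvDfsA (pvAdjA N Edges) f c v with hr1
              have hsub1 : ∀ x ∈ vis, x ∈ r1 := fun x hx => m1 x (hsub x hx)
              have hnode1 : node ∈ r1 := m1 node hnode
              have hsound1 : ∀ x ∈ r1, x ∈ vis ∨ (pvConn Edges node x ∧ 0 ≤ x ∧ x ≤ N) := by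
                intro x hx
                rcases msound x hx with hxv | ⟨hconn, hb⟩
                · exact hsound x hxv
                · exact Or.inr ⟨Relation.EqvGen.trans _ _ _
                    (Relation.EqvGen.rel _ _ (hcs c (List.mem_cons_self))) hconn, hb⟩
              have hclos1 : ∀ x ∈ r1, x ∉ vis → x ≠ node → ∀ y, pvER Edges x y → y ∈ r1 := by
                intro x hx hxv hxn y hy
                rcases msound x hx with hxv' | _
                · exact m1 y (hclos x hxv' hxv hxn y hy)
                · by_cases hxvmem : x ∈ v
                  · exact m1 y (hclos x hxvmem hxv hxn y hy)
                  · exact mclos x hx hxvmem y hy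
              obtain ⟨q1, q2, q3, q4⟩ := ihc (fun d hd => hcs d (List.mem_cons_of_mem _ hd)) r1 hsub1 hnode1 hsound1 hclos1
              exact ⟨fun x hx => q1 x (m1 x hx), fun d hd => by
                  rcases List.mem_cons.1 hd with rfl | hd
                  · exact q1 _ m2
                  · exact q2 _ hd, q3, q4⟩
      have hcs : ∀ c ∈ (pvAdjA N Edges).getD node [], pvER Edges node c :=
        fun c hc => (mem_pvAdjA N Edges node c).1 hc
      have hv0sub : ∀ x ∈ vis, x ∈ PySem.Set.add vis node := by
        intro x hx; rw [PySem.Set.mem_add]; exact Or.inl hx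
      have hv0node : node ∈ PySem.Set.add vis node := by
        rw [PySem.Set.mem_add]; exact Or.inr rfl
      have hv0sound : ∀ x ∈ PySem.Set.add vis node, x ∈ vis ∨ (pvConn Edges node x ∧ 0 ≤ x ∧ x ≤ N) := by
        intro x hx
        rcases (PySem.Set.mem_add _ _ _).1 hx with hx | rfl
        · exact Or.inl hx
        · exact Or.inr ⟨Relation.EqvGen.refl _, h0, h1⟩
      have hv0clos : ∀ x ∈ PySem.Set.add vis node, x ∉ vis → x ≠ node → ∀ y, pvER Edges x y → y ∈ PySem.Set.add vis node := by
        intro x hx hx1 hx2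
        rcases (PySem.Set.mem_add _ _ _).1 hx with hx | rfl
        · exact absurd hx hx1
        · exact absurd rfl hx2
      obtain ⟨q1, q2, q3, q4⟩ := aux _ hcs (PySem.Set.add vis node) hv0sub hv0node hv0sound hv0clos
      simp only [pvDfsA]
      refine ⟨fun x hx => q1 x (hv0sub x hx), q1 node hv0node, q3, ?_⟩
      intro x hx hxv y hy
      by_cases hxn : x = node
      · subst hxn
        exact q2 y ((mem_pvAdjA N Edges x y).2 hy)
      · exact q4 x hx hxv hxn y hy
theorem pvConn_mono {E' l : List (Int × Int)} {x y : Int} (h : pvConn E' x y) : pvConn (E' ++ l) x y := by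
  refine Relation.EqvGen.mono ?_ h
  intro a b hab
  rcases hab with hab | hab
  · exact Or.inl (List.mem_append_left _ hab)
  · exact Or.inr (List.mem_append_left _ hab)
theorem pvConn_nil {x y : Int} (h : pvConn [] x y) : x = y := by
  induction h with
  | rel a b hab => rcases hab with hab | hab <;> simp at hab
  | refl a => rfl
  | symm a b _ ih => omega
  | trans a b c _ _ ih1 ih2 => omega
theorem pvParent0_fold_get? (l : List Int) (d : PySem.Dict Int Int) (x : Int) :
    (l.foldl (fun d i => d.insert i i) d).get? x = if x ∈ l then some x else d.get? x := by
  induction l generalizing d with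
  | nil => simp
  | cons a t ih =>
      rw [List.foldl_cons, ih, PySem.Dict.get?_insert]
      by_cases h1 : x ∈ t <;> by_cases h2 : x = a <;> subst_vars <;> simp_all
theorem pvParent0_get? {N x : Int} (h0 : 0 ≤ x) (h1 : x ≤ N) : (pvParent0 N).get? x = some x := by
  unfold pvParent0
  rw [pvParent0_fold_get?, if_pos (by rw [PySem.List.mem_pyRange_one]; omega)]
theorem pvFind_fix {P : PySem.Dict Int Int} {x : Int} (h : P.getD x x = x) :
    ∀ fuel, pvFindB P fuel x = x := by
  intro fuel
  cases fuel with
  | zero => rfl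
  | succ f => simp [pvFindB, h]

-- invariant part 1: every node of 0..N has a parent entry that is a smaller-or-equal node it is connected to
def pvK1 (N : Int) (E' : List (Int × Int)) (P : PySem.Dict Int Int) : Prop :=
  ∀ x, 0 ≤ x → x ≤ N → ∃ p, P.get? x = some p ∧ 0 ≤ p ∧ p ≤ x ∧ pvConn E' x p
theorem pvFind_spec {N : Int} {E' : List (Int × Int)} {P : PySem.Dict Int Int} (hK : pvK1 N E' P) :
    ∀ (fuel : Nat) (x : Int), 0 ≤ x → x ≤ N → x.toNat < fuel →
      0 ≤ pvFindB P fuel x ∧ pvFindB P fuel x ≤ x ∧ pvConn E' x (pvFindB P fuel x) ∧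
      P.getD (pvFindB P fuel x) (pvFindB P fuel x) = pvFindB P fuel x := by
  intro fuel
  induction fuel with
  | zero => intro x _ _ h; omega
  | succ f ihf =>
      intro x h0 h1 hf
      obtain ⟨p, hp, hp0, hpx, hpc⟩ := hK x h0 h1
      have hgd : P.getD x x = p := by simp [PySem.Dict.getD_eq_get?_getD, hp]
      by_cases hpeq : p = x
      · subst hpeq
        simp only [pvFindB, hgd, if_pos rfl]
        exact ⟨h0, le_refl _, Relation.EqvGen.refl _, hgd⟩
      · have hlt : p < x := lt_of_le_of_ne hpx hpeq
        have := ihf p hp0 (le_trans hpx h1) (by omega)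
        simp only [pvFindB, hgd, if_neg hpeq]
        exact ⟨this.1, le_trans this.2.1 hpx, Relation.EqvGen.trans _ _ _ hpc this.2.2.1, this.2.2.2⟩
theorem pvFind_insert {N : Int} {E' : List (Int × Int)} {P : PySem.Dict Int Int} (hK : pvK1 N E' P)
    {s t : Int} (hts : t < s) (hsfix : P.getD s s = s) (htfix : P.getD t t = t) :
    ∀ (fuel : Nat) (x : Int), 0 ≤ x → x ≤ N → x.toNat < fuel →
      pvFindB (P.insert s t) fuel x = if pvFindB P fuel x = s then t else pvFindB P fuel x := by
  intro fuel
  induction fuel with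
  | zero => intro x _ _ h; omega
  | succ f ihf =>
      intro x h0 h1 hf
      have hgd' : (P.insert s t).getD x x = if x = s then t else P.getD x x := PySem.Dict.getD_insert _ _ _ _ _
      by_cases hxs : x = s
      · subst hxs
        have h1' : (P.insert x t).getD x x = t := by rw [hgd', if_pos rfl]
        have htne : t ≠ x := by omega
        have htfix' : (P.insert x t).getD t t = t := by
          rw [PySem.Dict.getD_insert, if_neg htne, htfix]
        simp [pvFindB, h1', htne, pvFind_fix htfix' f, hsfix]
      · obtain ⟨p, hp, hp0, hpx, _⟩ := hK x h0 h1
        have hgd : P.getD x x = p := by simp [PySem.Dict.getD_eq_get?_getD, hp]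
        by_cases hpeq : p = x
        · subst hpeq
          simp [pvFindB, hgd', hxs, hgd]
        · have hlt : p < x := lt_of_le_of_ne hpx hpeq
          simp only [pvFindB, hgd', if_neg hxs, hgd, if_neg hpeq]
          exact ihf p hp0 (le_trans hpx h1) (by omega)
def pvPInv (N : Int) (E' : List (Int × Int)) (P : PySem.Dict Int Int) : Prop :=
  pvK1 N E' P ∧
  ∀ x y, 0 ≤ x → x ≤ N → 0 ≤ y → y ≤ N → pvConn E' x y →
    pvFindB P (N.toNat + 2) x = pvFindB P (N.toNat + 2) y

-- if the new roots factor through a relabelling π of the old roots that merges u's and v's root,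
-- then connectivity of the extended edge list is reflected in the new roots
theorem pvC_of_root {N : Int} {E' : List (Int × Int)} {P P' : PySem.Dict Int Int} {u v : Int}
    (hP : pvPInv N E' P)
    (hE : ∀ e ∈ E' ++ [(u, v)], 0 ≤ e.1 ∧ e.1 ≤ N ∧ 0 ≤ e.2 ∧ e.2 ≤ N)
    (π : Int → Int)
    (hroot : ∀ x, 0 ≤ x → x ≤ N → pvFindB P' (N.toNat + 2) x = π (pvFindB P (N.toNat + 2) x))
    (hπuv : π (pvFindB P (N.toNat + 2) u) = π (pvFindB P (N.toNat + 2) v)) :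
    ∀ x y, 0 ≤ x → x ≤ N → 0 ≤ y → y ≤ N → pvConn (E' ++ [(u, v)]) x y →
      pvFindB P' (N.toNat + 2) x = pvFindB P' (N.toNat + 2) y := by
  have main : ∀ x y, pvConn (E' ++ [(u, v)]) x y →
      x = y ∨ (0 ≤ x ∧ x ≤ N ∧ 0 ≤ y ∧ y ≤ N ∧ pvFindB P' (N.toNat + 2) x = pvFindB P' (N.toNat + 2) y) := by
    intro x y h
    induction h with
    | rel a b hab =>
        right
        have hbounds : (0 ≤ a ∧ a ≤ N) ∧ (0 ≤ b ∧ b ≤ N) := by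
          rcases hab with hab | hab <;> have := hE _ hab <;> exact ⟨⟨by tauto, by tauto⟩, ⟨by tauto, by tauto⟩⟩
        refine ⟨hbounds.1.1, hbounds.1.2, hbounds.2.1, hbounds.2.2, ?_⟩
        rw [hroot a hbounds.1.1 hbounds.1.2, hroot b hbounds.2.1 hbounds.2.2]
        have hcase : pvER E' a b ∨ (a, b) = (u, v) ∨ (b, a) = (u, v) := by
          rcases hab with hab | hab <;> rcases List.mem_append.1 hab with h' | h'
          · exact Or.inl (Or.inl h')
          · simp at h'; right; left; simp [h']
          · exact Or.inl (Or.inr h')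
          · simp at h'; right; right; simp [h']
        rcases hcase with h' | h' | h'
        · rw [hP.2 a b hbounds.1.1 hbounds.1.2 hbounds.2.1 hbounds.2.2 (Relation.EqvGen.rel _ _ h')]
        · have := Prod.ext_iff.1 h'
          simp at this
          obtain ⟨rfl, rfl⟩ := this
          exact hπuv
        · have := Prod.ext_iff.1 h'
          simp at this
          obtain ⟨rfl, rfl⟩ := this
          exact hπuv.symm
    | refl a => exact Or.inl rfl
    | symm a b _ ih => rcases ih with rfl | ⟨h1, h2, h3, h4, h5⟩; exact Or.inl rfl; exact Or.inr ⟨h3, h4, h1, h2, h5.symm⟩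
    | trans a b c _ _ ih1 ih2 =>
        rcases ih1 with rfl | ⟨h1, h2, h3, h4, h5⟩
        · exact ih2
        · rcases ih2 with rfl | ⟨g1, g2, g3, g4, g5⟩
          · exact Or.inr ⟨h1, h2, h3, h4, h5⟩
          · exact Or.inr ⟨h1, h2, g3, g4, h5.trans g5⟩
  intro x y hx0 hx1 hy0 hy1 h
  rcases main x y h with rfl | h'
  · rfl
  · exact h'.2.2.2.2
theorem pvPInv_init (N : Int) : pvPInv N [] (pvParent0 N) := by
  constructor
  · exact fun x h0 h1 => ⟨x, pvParent0_get? h0 h1, h0, le_refl x, Relation.EqvGen.refl x⟩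
  · intro x y _ _ _ _ h
    rw [pvConn_nil h]
theorem pvPInv_step (N : Int) (E' : List (Int × Int)) (P : PySem.Dict Int Int) (u v : Int)
    (hP : pvPInv N E' P)
    (hE : ∀ e ∈ E' ++ [(u, v)], 0 ≤ e.1 ∧ e.1 ≤ N ∧ 0 ≤ e.2 ∧ e.2 ≤ N) :
    pvPInv N (E' ++ [(u, v)])
      (if pvFindB P (N.toNat + 2) u < pvFindB P (N.toNat + 2) v then
        P.insert (pvFindB P (N.toNat + 2) v) (pvFindB P (N.toNat + 2) u)
      else if pvFindB P (N.toNat + 2) v < pvFindB P (N.toNat + 2) u then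
        P.insert (pvFindB P (N.toNat + 2) u) (pvFindB P (N.toNat + 2) v)
      else P) := by
  have huv := hE (u, v) (List.mem_append_right _ (List.mem_singleton.2 rfl))
  obtain ⟨hu0, hu1, hv0, hv1⟩ := huv
  have sru := pvFind_spec hP.1 (N.toNat + 2) u hu0 hu1 (by omega)
  have srv := pvFind_spec hP.1 (N.toNat + 2) v hv0 hv1 (by omega)
  set ru := pvFindB P (N.toNat + 2) u with hru
  set rv := pvFindB P (N.toNat + 2) v with hrv
  have hconn_uv : pvConn (E' ++ [(u, v)]) u v :=
    Relation.EqvGen.rel _ _ (Or.inl (List.mem_append_right _ (List.mem_singleton.2 rfl)))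
  have hconn_rvru : pvConn (E' ++ [(u, v)]) rv ru :=
    Relation.EqvGen.trans _ _ _ (Relation.EqvGen.symm _ _ (pvConn_mono srv.2.2.1))
      (Relation.EqvGen.trans _ _ _ (Relation.EqvGen.symm _ _ hconn_uv) (pvConn_mono sru.2.2.1))
  rcases lt_trichotomy ru rv with hlt | heq | hlt
  · rw [if_pos hlt]
    constructor
    · intro x h0 h1
      by_cases hx : x = rv
      · subst hx
        exact ⟨ru, PySem.Dict.get?_insert_self _ _ _, sru.1, by omega, hconn_rvru⟩
      · obtain ⟨p, hp, hp0, hpx, hpc⟩ := hP.1 x h0 h1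
        exact ⟨p, by rw [PySem.Dict.get?_insert, if_neg hx]; exact hp, hp0, hpx, pvConn_mono hpc⟩
    · refine pvC_of_root hP hE (fun r => if r = rv then ru else r) ?_ ?_
      · intro x h0 h1
        exact pvFind_insert hP.1 hlt srv.2.2.2 sru.2.2.2 (N.toNat + 2) x h0 h1 (by omega)
      · rw [← hru, ← hrv]
        simp [hlt.ne]
  · rw [if_neg (by omega), if_neg (by omega)]
    constructor
    · intro x h0 h1
      obtain ⟨p, hp, hp0, hpx, hpc⟩ := hP.1 x h0 h1
      exact ⟨p, hp, hp0, hpx, pvConn_mono hpc⟩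
    · refine pvC_of_root hP hE (fun r => r) ?_ ?_
      · intro x _ _; rfl
      · exact heq
  · rw [if_neg (by omega), if_pos hlt]
    constructor
    · intro x h0 h1
      by_cases hx : x = ru
      · subst hx
        exact ⟨rv, PySem.Dict.get?_insert_self _ _ _, srv.1, by omega,
          Relation.EqvGen.symm _ _ hconn_rvru⟩
      · obtain ⟨p, hp, hp0, hpx, hpc⟩ := hP.1 x h0 h1
        exact ⟨p, by rw [PySem.Dict.get?_insert, if_neg hx]; exact hp, hp0, hpx, pvConn_mono hpc⟩
    · refine pvC_of_root hP hE (fun r => if r = ru then rv else r) ?_ ?_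
      · intro x h0 h1
        exact pvFind_insert hP.1 hlt sru.2.2.2 srv.2.2.2 (N.toNat + 2) x h0 h1 (by omega)
      · rw [← hru, ← hrv]
        simp [hlt.ne]
theorem pvPInv_all (N : Int) (Edges : List (Int × Int))
    (hpre : ∀ e ∈ Edges, 0 ≤ e.1 ∧ e.1 ≤ N ∧ 0 ≤ e.2 ∧ e.2 ≤ N) :
    pvPInv N Edges (pvParentB N Edges) := by
  suffices h : ∀ (todo done : List (Int × Int)) (P : PySem.Dict Int Int),
      done ++ todo = Edges → pvPInv N done P →
      pvPInv N (done ++ todo)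
        (todo.foldl (fun P e =>
          let ru := pvFindB P (N.toNat + 2) e.1
          let rv := pvFindB P (N.toNat + 2) e.2
          if ru < rv then P.insert rv ru else if rv < ru then P.insert ru rv else P) P) by
    have := h Edges [] (pvParent0 N) rfl (pvPInv_init N)
    simpa [pvParentB] using this
  intro todo
  induction todo with
  | nil => intro done P heq hP; simpa using hP
  | cons e tl ih =>
      intro done P heq hP
      rw [List.foldl_cons]
      have hEe : ∀ e' ∈ done ++ [(e.1, e.2)], 0 ≤ e'.1 ∧ e'.1 ≤ N ∧ 0 ≤ e'.2 ∧ e'.2 ≤ N := by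
        intro e' he'
        rcases List.mem_append.1 he' with h' | h'
        · exact hpre e' (by rw [← heq]; exact List.mem_append_left _ h')
        · simp at h'
          have : e' = e := by cases e; cases e'; simp_all
          subst this
          exact hpre e' (by rw [← heq]; exact List.mem_append_right _ List.mem_cons_self)
      have hstep := pvPInv_step N done P e.1 e.2 hP hEe
      have hre : done ++ [(e.1, e.2)] = done ++ [e] := by cases e; rfl
      rw [hre] at hstep
      have := ih (done ++ [e]) _ (by simpa [List.append_assoc] using heq) hstep
      rw [List.append_assoc] at this
      simpa using this
theorem pvRoot_iff (N : Int) (Edges : List (Int × Int))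
    (hpre : ∀ e ∈ Edges, 0 ≤ e.1 ∧ e.1 ≤ N ∧ 0 ≤ e.2 ∧ e.2 ≤ N)
    (x y : Int) (hx0 : 0 ≤ x) (hx1 : x ≤ N) (hy0 : 0 ≤ y) (hy1 : y ≤ N) :
    pvFindB (pvParentB N Edges) (N.toNat + 2) x = pvFindB (pvParentB N Edges) (N.toNat + 2) y
      ↔ pvConn Edges x y := by
  have hP := pvPInv_all N Edges hpre
  constructor
  · intro h
    have sx := pvFind_spec hP.1 (N.toNat + 2) x hx0 hx1 (by omega)
    have sy := pvFind_spec hP.1 (N.toNat + 2) y hy0 hy1 (by omega)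
    exact Relation.EqvGen.trans _ _ _ sx.2.2.1
      (h ▸ Relation.EqvGen.symm _ _ sy.2.2.1)
  · exact hP.2 x y hx0 hx1 hy0 hy1

-- DFS from an unvisited node of a component-closed visited set adds exactly the node's component
theorem pvDfs_iff (N : Int) (Edges : List (Int × Int))
    (hpre : ∀ e ∈ Edges, 0 ≤ e.1 ∧ e.1 ≤ N ∧ 0 ≤ e.2 ∧ e.2 ≤ N)
    (fuel : Nat) (node : Int) (vis : PySem.Set Int)
    (h0 : 0 ≤ node) (h1 : node ≤ N) (hnv : node ∉ vis) (hfuel : pvUnvis N vis < fuel)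
    (hclosed : pvClosed Edges vis) :
    ∀ x, x ∈ pvDfsA (pvAdjA N Edges) fuel node vis ↔ (x ∈ vis ∨ pvConn Edges node x) := by
  obtain ⟨m1, m2, msound, mclos⟩ := pvDfs_main N Edges hpre fuel node vis h0 h1 hnv hfuel
  have hcl : pvClosed Edges (pvDfsA (pvAdjA N Edges) fuel node vis) := by
    intro x hx y hy
    by_cases hxv : x ∈ vis
    · exact m1 y (hclosed x hxv y hy)
    · exact mclos x hx hxv y hy
  intro x
  constructor
  · intro hx
    rcases msound x hx with h | h
    · exact Or.inl h
    · exact Or.inr h.1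
  · rintro (hx | hconn)
    · exact m1 x hx
    · exact (pvConn_mem_iff hcl hconn).1 m2

-- the combined loop invariant: A's component counter equals the number of distinct union-find
-- roots collected by B, and both visited set and root set describe the processed components
theorem pvLoop (N : Int) (Edges : List (Int × Int))
    (hpre : ∀ e ∈ Edges, 0 ≤ e.1 ∧ e.1 ≤ N ∧ 0 ≤ e.2 ∧ e.2 ≤ N) :
    ∀ (m : Nat), (m : Int) ≤ N →
      (((PySem.List.pyRange 0 (m : Int) 1).foldl
          (fun (p : Int × PySem.Set Int) i =>
            if i ∈ p.2 then p else (p.1 + 1, pvDfsA (pvAdjA N Edges) (N.toNat + 2) i p.2))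
          (0, PySem.Set.empty)).1
        = PySem.Set.len ((PySem.List.pyRange 0 (m : Int) 1).foldl
            (fun (s : PySem.Set Int) i => PySem.Set.add s (pvFindB (pvParentB N Edges) (N.toNat + 2) i))
            PySem.Set.empty)) ∧
      (∀ x, x ∈ ((PySem.List.pyRange 0 (m : Int) 1).foldl
          (fun (p : Int × PySem.Set Int) i =>
            if i ∈ p.2 then p else (p.1 + 1, pvDfsA (pvAdjA N Edges) (N.toNat + 2) i p.2))
          (0, PySem.Set.empty)).2
        ↔ ∃ j, 0 ≤ j ∧ j < (m : Int) ∧ pvConn Edges j x) ∧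
      (∀ r, r ∈ (PySem.List.pyRange 0 (m : Int) 1).foldl
          (fun (s : PySem.Set Int) i => PySem.Set.add s (pvFindB (pvParentB N Edges) (N.toNat + 2) i))
          PySem.Set.empty
        ↔ ∃ j, 0 ≤ j ∧ j < (m : Int) ∧ r = pvFindB (pvParentB N Edges) (N.toNat + 2) j) := by
  intro m
  induction m with
  | zero =>
      intro _
      rw [PySem.List.pyRange_one_eq_nil (by omega)]
      refine ⟨rfl, ?_, ?_⟩ <;> intro z <;> simp [PySem.Set.empty] <;> omega
  | succ m ih =>
      intro hm1
      have hmN : (m : Int) ≤ N := by push_cast at hm1 ⊢; omega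
      have hcast : ((m + 1 : Nat) : Int) = (m : Int) + 1 := by push_cast; ring
      rw [hcast, PySem.List.pyRange_one_succ_right (by positivity), List.foldl_append, List.foldl_append]
      obtain ⟨ihc, ihA, ihB⟩ := ih hmN
      set stA := (PySem.List.pyRange 0 (m : Int) 1).foldl
          (fun (p : Int × PySem.Set Int) i =>
            if i ∈ p.2 then p else (p.1 + 1, pvDfsA (pvAdjA N Edges) (N.toNat + 2) i p.2))
          (0, PySem.Set.empty) with hstA
      set sB := (PySem.List.pyRange 0 (m : Int) 1).foldl
          (fun (s : PySem.Set Int) i => PySem.Set.add s (pvFindB (pvParentB N Edges) (N.toNat + 2) i))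
          PySem.Set.empty with hsB
      simp only [List.foldl_cons, List.foldl_nil]
      have hm0 : (0 : Int) ≤ (m : Int) := by positivity
      have hmN' : (m : Int) ≤ N := hmN
      by_cases hc : ∃ j, 0 ≤ j ∧ j < (m : Int) ∧ pvConn Edges j (m : Int)
      · obtain ⟨j0, hj00, hj0m, hj0conn⟩ := hc
        have hmem : (m : Int) ∈ stA.2 := (ihA _).2 ⟨j0, hj00, hj0m, hj0conn⟩
        rw [if_pos hmem]
        have hrootmem : pvFindB (pvParentB N Edges) (N.toNat + 2) (m : Int) ∈ sB := by
          refine (ihB _).2 ⟨j0, hj00, hj0m, ?_⟩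
          exact ((pvRoot_iff N Edges hpre j0 (m : Int) hj00 (by omega) hm0 hmN').2 hj0conn).symm
        rw [PySem.Set.add_of_mem hrootmem]
        refine ⟨ihc, ?_, ?_⟩
        · intro x
          rw [ihA x]
          constructor
          · rintro ⟨j, hj0, hjm, hconn⟩; exact ⟨j, hj0, by omega, hconn⟩
          · rintro ⟨j, hj0, hjm, hconn⟩
            by_cases hjm' : j < (m : Int)
            · exact ⟨j, hj0, hjm', hconn⟩
            · have : j = (m : Int) := by omega
              subst this
              exact ⟨j0, hj00, hj0m, Relation.EqvGen.trans _ _ _ hj0conn hconn⟩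
        · intro r
          rw [ihB r]
          constructor
          · rintro ⟨j, hj0, hjm, hr⟩; exact ⟨j, hj0, by omega, hr⟩
          · rintro ⟨j, hj0, hjm, hr⟩
            by_cases hjm' : j < (m : Int)
            · exact ⟨j, hj0, hjm', hr⟩
            · have : j = (m : Int) := by omega
              subst hr
              refine ⟨j0, hj00, hj0m, ?_⟩
              rw [this]
              exact ((pvRoot_iff N Edges hpre j0 (m : Int) hj00 (by omega) hm0 hmN').2 hj0conn).symm
      · have hnm : (m : Int) ∉ stA.2 := by
          intro hmem
          exact hc ((ihA _).1 hmem)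
        rw [if_neg hnm]
        have hclosed : pvClosed Edges stA.2 := by
          intro x hx y hy
          obtain ⟨j, hj0, hjm, hconn⟩ := (ihA x).1 hx
          exact (ihA y).2 ⟨j, hj0, hjm, Relation.EqvGen.trans _ _ _ hconn (Relation.EqvGen.rel _ _ hy)⟩
        have hfuel : pvUnvis N stA.2 < N.toNat + 2 := by
          have := pvUnvis_le N stA.2
          omega
        have hdfs := pvDfs_iff N Edges hpre (N.toNat + 2) (m : Int) stA.2 hm0 hmN' hnm hfuel hclosed
        have hrootnm : pvFindB (pvParentB N Edges) (N.toNat + 2) (m : Int) ∉ sB := by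
          intro hmem
          obtain ⟨j, hj0, hjm, hr⟩ := (ihB _).1 hmem
          exact hc ⟨j, hj0, hjm, Relation.EqvGen.symm _ _
            ((pvRoot_iff N Edges hpre (m : Int) j hm0 hmN' hj0 (by omega)).1 hr)⟩
        rw [PySem.Set.add_of_not_mem hrootnm]
        refine ⟨?_, ?_, ?_⟩
        · simp only [PySem.Set.len, List.length_append, List.length_cons, List.length_nil] at ihc ⊢
          push_cast at ihc ⊢
          omega
        · intro x
          rw [hdfs x, ihA x]
          constructor
          · rintro (⟨j, hj0, hjm, hconn⟩ | hconn)
            · exact ⟨j, hj0, by omega, hconn⟩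
            · exact ⟨(m : Int), hm0, by omega, hconn⟩
          · rintro ⟨j, hj0, hjm, hconn⟩
            by_cases hjm' : j < (m : Int)
            · exact Or.inl ⟨j, hj0, hjm', hconn⟩
            · have : j = (m : Int) := by omega
              subst this
              exact Or.inr hconn
        · intro r
          rw [List.mem_append, ihB r]
          constructor
          · rintro (⟨j, hj0, hjm, hr⟩ | hr)
            · exact ⟨j, hj0, by omega, hr⟩
            · exact ⟨(m : Int), hm0, by omega, by simpa using hr⟩
          · rintro ⟨j, hj0, hjm, hr⟩
            by_cases hjm' : j < (m : Int)
            · exact Or.inl ⟨j, hj0, hjm', hr⟩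
            · have : j = (m : Int) := by omega
              subst this
              exact Or.inr (by simpa using hr)

-- ===== VERDICT (by name: the statement is the Claim_ definition above) =====
theorem max_edges_to_remove_spec : Claim_equal_max_edges_to_remove := by
  unfold Claim_equal_max_edges_to_remove
  intro N M K Edges _ hpre
  unfold Spec_max_edges_to_remove max_edges_to_remove max_edges_to_remove_alt
  simp only []
  have key : ((PySem.List.pyRange 0 N 1).foldl
      (fun (p : Int × PySem.Set Int) i =>
        if i ∈ p.2 then p else (p.1 + 1, pvDfsA (pvAdjA N Edges) (N.toNat + 2) i p.2))
      (0, PySem.Set.empty)).1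
    = PySem.Set.len ((PySem.List.pyRange 0 N 1).foldl
        (fun (s : PySem.Set Int) i => PySem.Set.add s (pvFindB (pvParentB N Edges) (N.toNat + 2) i))
        PySem.Set.empty) := by
    by_cases hN : 0 ≤ N
    · have hc := (pvLoop N Edges hpre N.toNat (by omega)).1
      rwa [Int.toNat_of_nonneg hN] at hc
    · rw [PySem.List.pyRange_one_eq_nil (by omega)]
      rfl
  rw [key]
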